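-- pv_equiv track=rewrite | github.com/staurus86/seo-tools-platform | app/tools/bots/service_v2.py | _build_robots_linter
-- ===== SOURCE A (Python) =====
-- from typing import Any, Dict, List, Optional, Tuple
--
-- def _parse_robots_groups(robots_text: str) -> List[Dict[str, Any]]:
--     groups: List[Dict[str, Any]] = []
--     current_group: Optional[Dict[str, Any]] = None
--     for raw in (robots_text or "").splitlines():
--         line = raw.split("#", 1)[0].strip()
--         if not line or ":" not in line:
--             continue
--         key, value = [x.strip() for x in line.split(":", 1)]
--         key_l = key.lower()
--         if key_l == "user-agent":
--             ua = value.lower()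
--             if current_group is None or current_group.get("rules"):
--                 current_group = {"user_agents": [], "rules": []}
--                 groups.append(current_group)
--             current_group["user_agents"].append(ua)
--             continue
--         if key_l in ("allow", "disallow"):
--             if current_group is None:
--                 continue
--             current_group["rules"].append({"directive": key_l, "pattern": value})
--     return groups
--
-- def _build_robots_linter(robots_text: Optional[str]) -> Dict[str, Any]:
--     if not robots_text:
--         return {"findings": [{"severity": "warning", "code": "robots_missing", "message": "robots.txt is not reachable"}]}
--     findings: List[Dict[str, Any]] = []
--     groups = _parse_robots_groups(robots_text)
--     has_global_disallow_root = False
--     for g in groups: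
--         uas = [str(x).lower() for x in (g.get("user_agents") or [])]
--         if "*" in uas:
--             for rule in (g.get("rules") or []):
--                 if rule.get("directive") == "disallow" and str(rule.get("pattern") or "").strip() == "/":
--                     has_global_disallow_root = True
--     if has_global_disallow_root:
--         findings.append({"severity": "critical", "code": "global_disallow_root", "message": "Disallow: / found for User-agent: *"})
--     if "crawl-delay" in (robots_text or "").lower():
--         findings.append({"severity": "info", "code": "crawl_delay_present", "message": "crawl-delay directives present; verify per-engine behavior."})
--     if "googlebot" not in (robots_text or "").lower():
--         findings.append({"severity": "info", "code": "no_explicit_googlebot", "message": "No explicit Googlebot group. Using wildcard behavior."})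
--     if "yandex" not in (robots_text or "").lower():
--         findings.append({"severity": "info", "code": "no_explicit_yandex", "message": "No explicit Yandex group. Using wildcard behavior."})
--     return {"findings": findings}
-- ===== SOURCE B (Python) =====
-- from typing import Any, Dict, Optional
--
-- def _build_robots_linter(robots_text: Optional[str]) -> Dict[str, Any]:
--     # One-pass state machine over the lines; no intermediate groups list.
--     if not robots_text:
--         return {"findings": [{"severity": "warning", "code": "robots_missing", "message": "robots.txt is not reachable"}]}
--     active = has_star = has_rules = has_global_disallow_root = False
--     for raw in robots_text.splitlines():
--         line = raw.split("#", 1)[0].strip()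
--         if not line or ":" not in line:
--             continue
--         key, value = line.split(":", 1)
--         key_l = key.strip().lower()
--         value = value.strip()
--         if key_l == "user-agent":
--             if not active or has_rules:
--                 active, has_star, has_rules = True, False, False
--             if value.lower() == "*":
--                 has_star = True
--         elif active and key_l in ("allow", "disallow"):
--             has_rules = True
--             if key_l == "disallow" and has_star and value.strip() == "/":
--                 has_global_disallow_root = True
--     findings = []
--     if has_global_disallow_root:
--         findings.append({"severity": "critical", "code": "global_disallow_root", "message": "Disallow: / found for User-agent: *"})
--     low = robots_text.lower()
--     if "crawl-delay" in low:
--         findings.append({"severity": "info", "code": "crawl_delay_present", "message": "crawl-delay directives present; verify per-engine behavior."})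
--     if "googlebot" not in low:
--         findings.append({"severity": "info", "code": "no_explicit_googlebot", "message": "No explicit Googlebot group. Using wildcard behavior."})
--     if "yandex" not in low:
--         findings.append({"severity": "info", "code": "no_explicit_yandex", "message": "No explicit Yandex group. Using wildcard behavior."})
--     return {"findings": findings}
-- ===== Notes on version B (the rewrite author's own statement) =====
-- stated objective: alternative
-- what changed: Replaces the two-phase design (build a list of user-agent groups with aliased current-group mutation, then scan all groups for a wildcard Disallow: /) with a single pass over the lines that keeps only three booleans (group active, group has '*', group has rules) and sets the global-disallow flag online; the findings tail is unchanged.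
import Mathlib
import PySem

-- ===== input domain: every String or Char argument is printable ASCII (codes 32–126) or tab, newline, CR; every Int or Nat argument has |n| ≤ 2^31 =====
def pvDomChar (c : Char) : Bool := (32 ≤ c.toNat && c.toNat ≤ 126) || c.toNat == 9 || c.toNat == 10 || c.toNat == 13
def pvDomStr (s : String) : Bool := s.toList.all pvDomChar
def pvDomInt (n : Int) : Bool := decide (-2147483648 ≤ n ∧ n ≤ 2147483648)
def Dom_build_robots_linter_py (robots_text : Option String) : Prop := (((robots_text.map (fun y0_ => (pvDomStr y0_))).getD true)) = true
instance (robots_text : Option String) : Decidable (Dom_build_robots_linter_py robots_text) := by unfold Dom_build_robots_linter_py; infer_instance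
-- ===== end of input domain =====

-- B replaces A's two-phase parse-groups-then-scan with a single pass over the lines
-- keeping three booleans (active group / group has '*' / group has rules); same findings.

-- shared data literals (the four finding records and the 'missing' result)
def pvFindMissing : List (String × List (List (String × String))) :=
  [("findings", [[("severity", "warning"), ("code", "robots_missing"), ("message", "robots.txt is not reachable")]])]
def pvFindCrit : List (String × String) :=
  [("severity", "critical"), ("code", "global_disallow_root"), ("message", "Disallow: / found for User-agent: *")]
def pvFindCd : List (String × String) :=
  [("severity", "info"), ("code", "crawl_delay_present"), ("message", "crawl-delay directives present; verify per-engine behavior.")]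
def pvFindGb : List (String × String) :=
  [("severity", "info"), ("code", "no_explicit_googlebot"), ("message", "No explicit Googlebot group. Using wildcard behavior.")]
def pvFindYx : List (String × String) :=
  [("severity", "info"), ("code", "no_explicit_yandex"), ("message", "No explicit Yandex group. Using wildcard behavior.")]

-- line = raw.split("#",1)[0].strip(); skip if empty or without ':'; else the stripped key/value
-- (identical lines of code in both Pythons, so one shared lexer helper)
def pvLineKV (raw : String) : Option (String × String) :=
  let line := PySem.Str.strip (((PySem.Str.splitMax? raw "#" 1).getD []).headD "")
  if line == "" || !PySem.Str.isIn ":" line then none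
  else
    match PySem.Str.splitMax? line ":" 1 with
    | some (k :: v :: _) => some (PySem.Str.strip k, PySem.Str.strip v)
    | _ => none  -- unreachable: ":" ∈ line

-- ===== PORT A =====
-- the body of _parse_robots_groups' loop; current_group is aliased into groups in Python,
-- so the state is (finished groups, current group), flushed on replacement and at the end
def pvGroupStep (st : List (List String × List (String × String)) × Option (List String × List (String × String)))
    (raw : String) : List (List String × List (String × String)) × Option (List String × List (String × String)) :=
  match pvLineKV raw with
  | none => st
  | some (key, value) =>
    let key_l := PySem.Str.lower key
    if key_l == "user-agent" then
      let ua := PySem.Str.lower value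
      match st.2 with
      | none => (st.1, some ([ua], []))
      | some (uas, rules) =>
        if rules.isEmpty then (st.1, some (uas ++ [ua], rules))
        else (st.1 ++ [(uas, rules)], some ([ua], []))
    else if key_l == "allow" || key_l == "disallow" then
      match st.2 with
      | none => st
      | some (uas, rules) => (st.1, some (uas, rules ++ [(key_l, value)]))
    else st

def pvParseGroups (s : String) : List (List String × List (String × String)) :=
  let st := (PySem.Str.splitlines s).foldl pvGroupStep ([], none)
  st.1 ++ st.2.toList

-- body of the 'for g in groups' loop of _build_robots_linter
def pvScanGroup (f : Bool) (g : List String × List (String × String)) : Bool :=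
  let uas := g.1.map PySem.Str.lower
  if uas.contains "*" then
    g.2.foldl (fun f r => if r.1 == "disallow" && PySem.Str.strip r.2 == "/" then true else f) f
  else f

def build_robots_linter_py (robots_text : Option String) : List (String × List (List (String × String))) :=
  match robots_text with
  | none => pvFindMissing
  | some s =>
    if s == "" then pvFindMissing
    else
      let groups := pvParseGroups s
      let has_global_disallow_root := groups.foldl pvScanGroup false
      let low := PySem.Str.lower s
      let findings :=
        (if has_global_disallow_root then [pvFindCrit] else [])
        ++ (if PySem.Str.isIn "crawl-delay" low then [pvFindCd] else [])
        ++ (if !PySem.Str.isIn "googlebot" low then [pvFindGb] else [])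
        ++ (if !PySem.Str.isIn "yandex" low then [pvFindYx] else [])
      [("findings", findings)]

-- ===== PORT B =====
-- one-pass state (active, has_star, has_rules, has_global_disallow_root)
def pvLintStep (st : Bool × Bool × Bool × Bool) (raw : String) : Bool × Bool × Bool × Bool :=
  match pvLineKV raw with
  | none => st
  | some (key, value) =>
    let key_l := PySem.Str.lower key
    if key_l == "user-agent" then
      let sr := if !st.1 || st.2.2.1 then (false, false) else (st.2.1, st.2.2.1)
      let star := if PySem.Str.lower value == "*" then true else sr.1
      (true, star, sr.2, st.2.2.2)
    else if st.1 && (key_l == "allow" || key_l == "disallow") then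
      let flag := if key_l == "disallow" && st.2.1 && PySem.Str.strip value == "/" then true else st.2.2.2
      (st.1, st.2.1, true, flag)
    else st

def build_robots_linter_py_alt (robots_text : Option String) : List (String × List (List (String × String))) :=
  match robots_text with
  | none => pvFindMissing
  | some s =>
    if s == "" then pvFindMissing
    else
      let st := (PySem.Str.splitlines s).foldl pvLintStep (false, false, false, false)
      let has_global_disallow_root := st.2.2.2
      let low := PySem.Str.lower s
      let findings :=
        (if has_global_disallow_root then [pvFindCrit] else [])
        ++ (if PySem.Str.isIn "crawl-delay" low then [pvFindCd] else [])
        ++ (if !PySem.Str.isIn "googlebot" low then [pvFindGb] else [])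
        ++ (if !PySem.Str.isIn "yandex" low then [pvFindYx] else [])
      [("findings", findings)]

-- ===== PRECONDITION & SPEC =====
def Spec_build_robots_linter_py (robots_text : Option String) (out : List (String × List (List (String × String)))) : Prop := out = build_robots_linter_py_alt robots_text
instance (robots_text : Option String) (out : List (String × List (List (String × String)))) : Decidable (Spec_build_robots_linter_py robots_text out) := by unfold Spec_build_robots_linter_py; infer_instance

-- ===== CLAIM (what is proved, stated in full; the proofs are below) =====
def Claim_equal_build_robots_linter_py : Prop := ∀ (robots_text : Option String), Dom_build_robots_linter_py robots_text → Spec_build_robots_linter_py robots_text (build_robots_linter_py robots_text)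

-- ===== LEMMAS AND PROOFS =====

def pvGroupFlag (g : List String × List (String × String)) : Bool :=
  (g.1.map PySem.Str.lower).contains "*" && g.2.any (fun r => r.1 == "disallow" && PySem.Str.strip r.2 == "/")

def pvGroupsFlag (gs : List (List String × List (String × String))) : Bool :=
  gs.foldl pvScanGroup false

def pvInv (stA : List (List String × List (String × String)) × Option (List String × List (String × String)))
    (stB : Bool × Bool × Bool × Bool) : Prop :=
  stB.1 = stA.2.isSome ∧
  (∀ uas rules, stA.2 = some (uas, rules) →
      stB.2.1 = (uas.map PySem.Str.lower).contains "*" ∧ stB.2.2.1 = !rules.isEmpty) ∧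
  stB.2.2.2 = pvGroupsFlag (stA.1 ++ stA.2.toList)

theorem toNat_ofNat_valid (n : Nat) (h : n.isValidChar) : (Char.ofNat n).toNat = n := by
  simp [Char.ofNat, h, Char.ofNatAux, Char.toNat]

theorem pvLowerChar_idem (c : Char) :
    PySem.Chars.lowerChar (PySem.Chars.lowerChar c) = PySem.Chars.lowerChar c := by
  simp only [PySem.Chars.lowerChar, PySem.Chars.isupper]
  split_ifs with h1 h2 <;> try rfl
  exfalso
  simp only [Bool.and_eq_true, decide_eq_true_eq, Char.le_def, UInt32.le_iff_toNat_le] at h1 h2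
  have hA : 65 ≤ c.toNat ∧ c.toNat ≤ 90 := ⟨h1.1, h1.2⟩
  have hv : (c.toNat + 32).isValidChar := by left; omega
  have h2' : (Char.ofNat (c.toNat + 32)).toNat ≤ 90 := h2.2
  rw [toNat_ofNat_valid _ hv] at h2'
  omega

theorem pvLower_idem (s : String) :
    PySem.Str.lower (PySem.Str.lower s) = PySem.Str.lower s := by
  simp only [PySem.Str.lower, PySem.Chars.lower]
  congr 1
  simp [List.map_map, Function.comp, pvLowerChar_idem]

theorem pvFoldRules_eq (rs : List (String × String)) (f : Bool) :
    rs.foldl (fun f r => if r.1 == "disallow" && PySem.Str.strip r.2 == "/" then true else f) f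
      = (f || rs.any (fun r => r.1 == "disallow" && PySem.Str.strip r.2 == "/")) := by
  induction rs generalizing f with
  | nil => simp
  | cons r rs ih =>
    rw [List.foldl_cons, ih]
    by_cases h : (r.1 == "disallow" && PySem.Str.strip r.2 == "/") = true
    · cases f <;> simp [h]
    · simp only [Bool.not_eq_true] at h
      cases f <;> simp [h]

theorem pvScanGroup_eq (f : Bool) (g : List String × List (String × String)) :
    pvScanGroup f g = (f || pvGroupFlag g) := by
  unfold pvScanGroup pvGroupFlag
  by_cases h : ((g.1.map PySem.Str.lower).contains "*") = true
  · rw [if_pos h, pvFoldRules_eq, h]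
    cases f <;> simp
  · simp only [Bool.not_eq_true] at h
    rw [if_neg (by rw [h]; simp), h]
    cases f <;> simp

theorem pvGroupsFlag_append (gs : List (List String × List (String × String))) (g : List String × List (String × String)) :
    pvGroupsFlag (gs ++ [g]) = (pvGroupsFlag gs || pvGroupFlag g) := by
  simp [pvGroupsFlag, List.foldl_append, pvScanGroup_eq]

theorem pvInv_step (stA : List (List String × List (String × String)) × Option (List String × List (String × String)))
    (stB : Bool × Bool × Bool × Bool) (raw : String) (h : pvInv stA stB) :
    pvInv (pvGroupStep stA raw) (pvLintStep stB raw) := by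
  obtain ⟨done, cur⟩ := stA
  obtain ⟨b1, b2, b3, b4⟩ := stB
  obtain ⟨h1, h2, h3⟩ := h
  simp only at h1 h2 h3
  unfold pvGroupStep pvLintStep
  cases hkv : pvLineKV raw with
  | none => exact ⟨h1, h2, h3⟩
  | some kv =>
    obtain ⟨key, value⟩ := kv
    simp only
    by_cases hua : (PySem.Str.lower key == "user-agent") = true
    · rw [if_pos hua, if_pos hua]
      cases cur with
      | none =>
        simp only [Option.isSome_none] at h1
        subst h1
        dsimp only
        simp only [Bool.not_false, Bool.true_or]
        simp only [if_true]
        refine ⟨rfl, ?_, ?_⟩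
        · intro uas' rules' hh
          injection hh with hh
          have huas : uas' = [PySem.Str.lower value] := (Prod.mk.injEq .. ▸ hh).1.symm
          have hrules : rules' = [] := (Prod.mk.injEq .. ▸ hh).2.symm
          subst huas; subst hrules
          constructor
          · simp only [List.map_cons, List.map_nil, pvLower_idem]
            by_cases hstar : (PySem.Str.lower value == "*") = true
            · have hv := beq_iff_eq.mp hstar
              simp [hstar, hv]
            · have hv : ¬ PySem.Str.lower value = "*" := by simpa using hstar
              simp [hstar, hv, Ne.symm hv]
          · simp
        · simp only [h3]
          simp only [Option.toList_some]
          rw [pvGroupsFlag_append]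
          simp [pvGroupFlag]
      | some g =>
        obtain ⟨uas, rules⟩ := g
        simp only [Option.isSome_some] at h1
        subst h1
        obtain ⟨hb2, hb3⟩ := h2 uas rules rfl
        dsimp only
        by_cases hre : rules.isEmpty = true
        · rw [if_pos hre]
          have hrnil : rules = [] := List.isEmpty_iff.mp hre
          subst hrnil
          simp only [hb3, hre] at *
          simp only [Bool.not_true, Bool.false_or]
          refine ⟨rfl, ?_, ?_⟩
          · intro uas' rules' hh
            injection hh with hh
            have huas : uas' = uas ++ [PySem.Str.lower value] := (Prod.mk.injEq .. ▸ hh).1.symm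
            have hrules : rules' = [] := (Prod.mk.injEq .. ▸ hh).2.symm
            subst huas; subst hrules
            constructor
            · simp only [List.map_append, List.map_cons, List.map_nil, List.contains_append,
                hb2, pvLower_idem]
              by_cases hstar : (PySem.Str.lower value == "*") = true
              · have hv := beq_iff_eq.mp hstar
                simp [hstar, hv]
              · have hv : ¬ PySem.Str.lower value = "*" := by simpa using hstar
                simp [hstar, hv, Ne.symm hv]
            · simp
          · simp only [h3]
            simp [pvGroupsFlag_append, pvGroupFlag]
        · rw [if_neg hre]
          simp only [Bool.not_eq_true] at hre
          simp only [hb3, hre, Bool.not_false, Bool.or_true, if_true]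
          refine ⟨rfl, ?_, ?_⟩
          · intro uas' rules' hh
            injection hh with hh
            have huas : uas' = [PySem.Str.lower value] := (Prod.mk.injEq .. ▸ hh).1.symm
            have hrules : rules' = [] := (Prod.mk.injEq .. ▸ hh).2.symm
            subst huas; subst hrules
            constructor
            · simp only [List.map_cons, List.map_nil, pvLower_idem]
              by_cases hstar : (PySem.Str.lower value == "*") = true
              · have hv := beq_iff_eq.mp hstar
                simp [hstar, hv]
              · have hv : ¬ PySem.Str.lower value = "*" := by simpa using hstar
                simp [hstar, hv, Ne.symm hv]
            · simp
          · simp only [h3]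
            simp only [Option.toList_some, Option.toList_none]
            rw [show done ++ [(uas, rules)] ++ [([PySem.Str.lower value], ([] : List (String × String)))]
                  = (done ++ [(uas, rules)]) ++ [([PySem.Str.lower value], ([] : List (String × String)))] by simp,
              pvGroupsFlag_append (done ++ [(uas, rules)])]
            simp [pvGroupFlag]
    · rw [if_neg hua, if_neg hua]
      by_cases had : (PySem.Str.lower key == "allow" || PySem.Str.lower key == "disallow") = true
      · rw [if_pos had]
        cases cur with
        | none =>
          simp only [Option.isSome_none] at h1
          subst h1
          rw [if_neg (by simp)]
          exact ⟨rfl, h2, h3⟩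
        | some g =>
          obtain ⟨uas, rules⟩ := g
          simp only [Option.isSome_some] at h1
          subst h1
          obtain ⟨hb2, hb3⟩ := h2 uas rules rfl
          rw [if_pos (by simp [had])]
          refine ⟨rfl, ?_, ?_⟩
          · intro uas' rules' hh
            injection hh with hh
            have huas : uas' = uas := (Prod.mk.injEq .. ▸ hh).1.symm
            have hrules : rules' = rules ++ [(PySem.Str.lower key, value)] := (Prod.mk.injEq .. ▸ hh).2.symm
            subst huas; subst hrules
            exact ⟨hb2, by simp⟩
          · simp only [h3, Option.toList_some]
            rw [pvGroupsFlag_append, pvGroupsFlag_append]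
            simp only [pvGroupFlag, hb2, List.any_append, List.any_cons, List.any_nil]
            cases hD : pvGroupsFlag done <;>
              cases hS : (uas.map PySem.Str.lower).contains "*" <;>
                cases hA : rules.any (fun r => r.1 == "disallow" && PySem.Str.strip r.2 == "/") <;>
                  cases hK : (PySem.Str.lower key == "disallow") <;>
                    cases hV : (PySem.Str.strip value == "/") <;>
                      simp [hD, hS, hA, hK, hV]
      · rw [if_neg had, if_neg (by simp only [Bool.not_eq_true] at had ⊢; simp [had])]
        exact ⟨h1, h2, h3⟩

theorem pvInv_fold (lines : List String)
    (stA : List (List String × List (String × String)) × Option (List String × List (String × String)))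
    (stB : Bool × Bool × Bool × Bool) (h : pvInv stA stB) :
    pvInv (lines.foldl pvGroupStep stA) (lines.foldl pvLintStep stB) := by
  induction lines generalizing stA stB with
  | nil => exact h
  | cons l ls ih =>
    rw [List.foldl_cons, List.foldl_cons]
    exact ih _ _ (pvInv_step _ _ _ h)

theorem pvFlag_eq (s : String) :
    ((PySem.Str.splitlines s).foldl pvLintStep (false, false, false, false)).2.2.2
      = (pvParseGroups s).foldl pvScanGroup false := by
  have h := pvInv_fold (PySem.Str.splitlines s) ([], none) (false, false, false, false)
    (by refine ⟨rfl, ?_, rfl⟩; intro uas rules hh; simp at hh)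
  exact h.2.2

-- ===== VERDICT (by name: the statement is the Claim_ definition above) =====
theorem build_robots_linter_py_spec : Claim_equal_build_robots_linter_py := by
  intro robots_text _
  unfold Spec_build_robots_linter_py
  cases robots_text with
  | none => rfl
  | some s =>
    unfold build_robots_linter_py build_robots_linter_py_alt
    dsimp only
    by_cases h : (s == "") = true
    · rw [if_pos h, if_pos h]
    · rw [if_neg h, if_neg h, pvFlag_eq]
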